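-- pv_equiv track=rewrite | github.com/MarounHaddad/Tracking-community-evolution-with-graph-autoencoders | scores/scores.py | convert_predicted_sequences_to_labels
-- ===== SOURCE A (Python) =====
-- def convert_predicted_sequences_to_labels(predicted_sequences):
--     # convert sequences to labels, since some score functions only take a labels vector as input
--     predicted_labels = []
--     index = 0
--     number_clusters = sum(len(x) for x in predicted_sequences)
--     for index in range(0, number_clusters):
--         sequence_index = 0
--         for sequence in predicted_sequences:
--             if index in sequence:
--                 predicted_labels.append(sequence_index)
--             sequence_index += 1
--         index += 1
--     return predicted_labels
-- ===== SOURCE B (Python) =====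
-- def convert_predicted_sequences_to_labels(predicted_sequences):
--     # One pass builds element -> ordered list of sequence indices; then one pass over the index range.
--     n = sum(len(s) for s in predicted_sequences)
--     by_index = {}
--     for si, seq in enumerate(predicted_sequences):
--         for x in dict.fromkeys(seq):
--             if 0 <= x < n:
--                 by_index.setdefault(x, []).append(si)
--     out = []
--     for i in range(n):
--         out.extend(by_index.get(i, []))
--     return out
-- ===== Notes on version B (the rewrite author's own statement) =====
-- stated objective: faster
-- what changed: Replaces the quadratic per-index scan over all sequences (with a linear 'in' test inside) by a single pass that builds a dict mapping element -> ordered list of sequence indices, then emits labels per index by dict lookup.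
import Mathlib
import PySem

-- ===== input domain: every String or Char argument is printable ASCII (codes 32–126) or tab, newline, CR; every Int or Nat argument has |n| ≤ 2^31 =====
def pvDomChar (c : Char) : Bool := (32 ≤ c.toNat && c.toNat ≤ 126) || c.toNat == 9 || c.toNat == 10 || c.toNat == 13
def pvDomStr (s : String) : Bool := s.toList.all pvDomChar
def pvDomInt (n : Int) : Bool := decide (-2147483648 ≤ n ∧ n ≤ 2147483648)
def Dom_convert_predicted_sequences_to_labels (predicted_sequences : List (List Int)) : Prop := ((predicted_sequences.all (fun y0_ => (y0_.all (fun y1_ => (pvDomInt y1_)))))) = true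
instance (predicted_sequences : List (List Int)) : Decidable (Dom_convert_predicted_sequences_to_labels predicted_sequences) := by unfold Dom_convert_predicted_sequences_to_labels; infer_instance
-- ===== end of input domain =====

-- B replaces A's per-index scan over all sequences by a dict built in one pass
-- (element -> ordered sequence-index list); objective: faster (asymptotic).

-- ===== PORT A =====
def convert_predicted_sequences_to_labels (predicted_sequences : List (List Int)) : List Int :=
  let number_clusters : Int := (predicted_sequences.map (fun x => (x.length : Int))).sum
  (PySem.List.pyRange 0 number_clusters 1).foldl
    (fun predicted_labels index =>
      (predicted_sequences.foldl
        (fun (st : List Int × Int) sequence =>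
          (if index ∈ sequence then st.1 ++ [st.2] else st.1, st.2 + 1))
        (predicted_labels, 0)).1)
    []

-- ===== PORT B =====
def convert_predicted_sequences_to_labels_alt (predicted_sequences : List (List Int)) : List Int :=
  let n : Int := (predicted_sequences.map (fun s => (s.length : Int))).sum
  let by_index : PySem.Dict Int (List Int) :=
    (PySem.List.enumerate predicted_sequences 0).foldl
      (fun d p =>
        (PySem.List.dedup p.2).foldl
          (fun d x =>
            if 0 ≤ x ∧ x < n then d.insert x (d.getD x [] ++ [p.1]) else d)
          d)
      PySem.Dict.empty
  (PySem.List.pyRange 0 n 1).foldl (fun out i => out ++ by_index.getD i []) []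

-- ===== PRECONDITION & SPEC =====
def Spec_convert_predicted_sequences_to_labels (predicted_sequences : List (List Int)) (out : List Int) : Prop := out = convert_predicted_sequences_to_labels_alt predicted_sequences
instance (predicted_sequences : List (List Int)) (out : List Int) : Decidable (Spec_convert_predicted_sequences_to_labels predicted_sequences out) := by unfold Spec_convert_predicted_sequences_to_labels; infer_instance

-- ===== CLAIM (what is proved, stated in full; the proofs are below) =====
def Claim_equal_convert_predicted_sequences_to_labels : Prop := ∀ (predicted_sequences : List (List Int)), Dom_convert_predicted_sequences_to_labels predicted_sequences → Spec_convert_predicted_sequences_to_labels predicted_sequences (convert_predicted_sequences_to_labels predicted_sequences)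

-- ===== LEMMAS AND PROOFS =====

/-- The labels contributed for index `i` when scanning the sequences with running
    sequence index starting at `si`. -/
def labelsFor (si i : Int) : List (List Int) → List Int
  | [] => []
  | s :: rest => (if i ∈ s then [si] else []) ++ labelsFor (si + 1) i rest

lemma innerA (i : Int) :
    ∀ (ps : List (List Int)) (labels : List Int) (si : Int),
      ps.foldl (fun (st : List Int × Int) sequence =>
          (if i ∈ sequence then st.1 ++ [st.2] else st.1, st.2 + 1)) (labels, si)
        = (labels ++ labelsFor si i ps, si + ps.length) := by
  intro ps
  induction ps with
  | nil => intro labels si; simp [labelsFor]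
  | cons s rest ih =>
    intro labels si
    simp only [List.foldl_cons, labelsFor]
    by_cases h : i ∈ s
    · rw [if_pos h, ih]; simp [h]; omega
    · rw [if_neg h, ih]; simp [h]; omega

/-- One step of B's dict-building loop for a fixed query key `i`. -/
lemma getD_foldStep_not_mem (n si i : Int) :
    ∀ (l : List Int) (d : PySem.Dict Int (List Int)), i ∉ l →
      (l.foldl (fun d x =>
          if 0 ≤ x ∧ x < n then d.insert x (d.getD x [] ++ [si]) else d) d).getD i []
        = d.getD i [] := by
  intro l
  induction l with
  | nil => intro d _; rfl
  | cons x t ih =>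
    intro d hmem
    simp only [List.foldl_cons]
    have hne : i ≠ x := by intro h; exact hmem (h ▸ List.mem_cons_self)
    have ht : i ∉ t := fun h => hmem (List.mem_cons_of_mem _ h)
    by_cases hr : 0 ≤ x ∧ x < n
    · rw [if_pos hr, ih _ ht, PySem.Dict.getD_insert_of_ne]; exact hne
    · rw [if_neg hr, ih _ ht]

lemma getD_foldSeq (n si i : Int) :
    ∀ (l : List Int) (d : PySem.Dict Int (List Int)), l.Nodup →
      (l.foldl (fun d x =>
          if 0 ≤ x ∧ x < n then d.insert x (d.getD x [] ++ [si]) else d) d).getD i []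
        = d.getD i [] ++ (if i ∈ l ∧ 0 ≤ i ∧ i < n then [si] else []) := by
  intro l
  induction l with
  | nil => intro d _; simp
  | cons x t ih =>
    intro d hnd
    have hx : x ∉ t := (List.nodup_cons.mp hnd).1
    have ht : t.Nodup := (List.nodup_cons.mp hnd).2
    simp only [List.foldl_cons]
    by_cases hix : i = x
    · subst hix
      by_cases hr : 0 ≤ i ∧ i < n
      · rw [if_pos hr, getD_foldStep_not_mem n si i t _ hx,
            PySem.Dict.getD_insert_self]
        simp [hr]
      · rw [if_neg hr, getD_foldStep_not_mem n si i t _ hx]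
        simp [hr]
    · have step : (if 0 ≤ x ∧ x < n then d.insert x (d.getD x [] ++ [si]) else d).getD i []
          = d.getD i [] := by
        by_cases hr : 0 ≤ x ∧ x < n
        · rw [if_pos hr, PySem.Dict.getD_insert_of_ne]; exact hix
        · rw [if_neg hr]
      rw [ih _ ht, step]
      simp [List.mem_cons, hix]

lemma getD_build (n i : Int) (hi : 0 ≤ i ∧ i < n) :
    ∀ (ps : List (List Int)) (si : Int) (d : PySem.Dict Int (List Int)),
      ((PySem.List.enumerate ps si).foldl
        (fun d p =>
          (PySem.List.dedup p.2).foldl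
            (fun d x =>
              if 0 ≤ x ∧ x < n then d.insert x (d.getD x [] ++ [p.1]) else d)
            d)
        d).getD i []
      = d.getD i [] ++ labelsFor si i ps := by
  intro ps
  induction ps with
  | nil => intro si d; simp [PySem.List.enumerate_nil, labelsFor]
  | cons s rest ih =>
    intro si d
    rw [PySem.List.enumerate_cons]
    simp only [List.foldl_cons]
    rw [ih, getD_foldSeq n si i _ _ (PySem.List.nodup_dedup s)]
    simp only [PySem.List.mem_dedup, labelsFor]
    by_cases h : i ∈ s
    · simp [h, hi]
    · simp [h]

-- ===== VERDICT (by name: the statement is the Claim_ definition above) =====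
theorem convert_predicted_sequences_to_labels_spec : Claim_equal_convert_predicted_sequences_to_labels := by
  intro ps _
  unfold Spec_convert_predicted_sequences_to_labels
  unfold convert_predicted_sequences_to_labels convert_predicted_sequences_to_labels_alt
  simp only []
  set n : Int := (ps.map (fun s => (s.length : Int))).sum with hn
  apply Eq.symm
  apply PySem.List.foldl_congr_mem
  intro acc i hi
  have hrange : 0 ≤ i ∧ i < n := (PySem.List.mem_pyRange_one).mp hi
  rw [getD_build n i hrange ps 0 PySem.Dict.empty, innerA]
  simp
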